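-- pv_equiv track=rewrite | github.com/ghawkes1217/Conjectures-and-Computations | testing/catest.py | bysum
-- ===== SOURCE A (Python) =====
-- def bysum(linear):
--     Grouped=[[linear[0]]]
--     for i in range(1,len(linear)):
--         if sum(linear[i])==sum(linear[i-1]):
--             Grouped[-1].append(linear[i])
--         else:
--             Grouped.append([linear[i]])
--     return(Grouped)
-- ===== SOURCE B (Python) =====
-- def bysum(linear):
--     out = []
--     n = len(linear)
--     i = 0
--     while i < n:
--         s = sum(linear[i])
--         j = i + 1
--         while j < n and sum(linear[j]) == s:
--             j += 1
--         out.append(linear[i:j])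
--         i = j
--     return out
-- ===== Notes on version B (the rewrite author's own statement) =====
-- stated objective: alternative
-- what changed: B replaces A's element-wise compare-with-previous loop (appending to the last group in place) by a two-pointer scan that finds each maximal run of equal sums and emits it as one slice; B also computes each row sum once per comparison instead of A's two sums per element, and returns [] on the empty list where A raises.
-- outside the precondition, e.g. on bysum([]): A raises IndexError, B returns []
import Mathlib
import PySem

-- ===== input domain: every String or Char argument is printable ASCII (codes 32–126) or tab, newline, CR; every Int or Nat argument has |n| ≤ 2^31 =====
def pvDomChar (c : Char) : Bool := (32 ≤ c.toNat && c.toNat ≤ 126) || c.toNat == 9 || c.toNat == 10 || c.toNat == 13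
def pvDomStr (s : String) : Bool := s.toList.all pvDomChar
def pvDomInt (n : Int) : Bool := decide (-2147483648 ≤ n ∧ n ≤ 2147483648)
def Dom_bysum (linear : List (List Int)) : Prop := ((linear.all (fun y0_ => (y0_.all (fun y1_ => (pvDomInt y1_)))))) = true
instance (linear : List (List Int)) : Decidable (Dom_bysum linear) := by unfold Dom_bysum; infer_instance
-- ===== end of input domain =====

-- B groups by maximal runs (two-pointer scan emitting one slice per group) instead of A's
-- element-wise compare-with-previous append loop; objective: alternative decomposition.
-- ===== PORT A =====
def bysum (linear : List (List Int)) : List (List (List Int)) :=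
  -- 'Grouped=[[linear[0]]]' : linear[0] raises IndexError on empty input (none here; excluded by Pre_)
  match PySem.List.pyGet? linear 0 with
  | none => []
  | some x0 =>
    (PySem.List.pyRange 1 (linear.length : Int) 1).foldl
      (fun g i =>
        if (PySem.List.pyGetD linear i []).sum = (PySem.List.pyGetD linear (i - 1) []).sum then
          -- Grouped[-1].append(linear[i]) : Grouped is always nonempty, so [-1] is its last element
          g.dropLast ++ [g.getLastD [] ++ [PySem.List.pyGetD linear i []]]
        else
          g ++ [[PySem.List.pyGetD linear i []]])
      [[x0]]

-- ===== PORT B =====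
-- inner while loop of Source B: advance j while j < n and sum(linear[j]) == s
def runlen (linear : List (List Int)) (n : Int) (s : Int) (j : Int) : Int :=
  if h : j < n ∧ (PySem.List.pyGetD linear j []).sum = s then
    runlen linear n s (j + 1)
  else j
termination_by (n - j).toNat
decreasing_by omega

-- cited by bloop's decreasing_by
theorem runlen_ge (linear : List (List Int)) (n s : Int) (j : Int) :
    j ≤ runlen linear n s j := by
  fun_induction runlen linear n s j with
  | case1 j h ih => omega
  | case2 j h => omega

-- outer while loop of Source B: one slice per maximal run of equal sums
def bloop (linear : List (List Int)) (n : Int) (i : Int)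
    (out : List (List (List Int))) : List (List (List Int)) :=
  if h : i < n then
    let s := (PySem.List.pyGetD linear i []).sum   -- in range: i < n = len(linear)
    let j := runlen linear n s (i + 1)
    bloop linear n j (out ++ [PySem.List.slice linear (some i) (some j)])
  else out
termination_by (n - i).toNat
decreasing_by
  have := runlen_ge linear n ((PySem.List.pyGetD linear i []).sum) (i + 1)
  omega

def bysum_alt (linear : List (List Int)) : List (List (List Int)) :=
  bloop linear (linear.length : Int) 0 []

-- ===== PRECONDITION & SPEC =====
-- Pre_ excludes only the empty list, on which A raises IndexError (linear[0]).
def Pre_bysum (linear : List (List Int)) : Prop := linear ≠ []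
instance (linear : List (List Int)) : Decidable (Pre_bysum linear) := by unfold Pre_bysum; infer_instance
def pvWitness_bysum : List (List Int) := [[1, 2], [3], [5]]

def Spec_bysum (linear : List (List Int)) (out : List (List (List Int))) : Prop := out = bysum_alt linear
instance (linear : List (List Int)) (out : List (List (List Int))) : Decidable (Spec_bysum linear out) := by unfold Spec_bysum; infer_instance

-- ===== CLAIM (what is proved, stated in full; the proofs are below) =====
def Claim_equal_bysum : Prop := ∀ (linear : List (List Int)), Dom_bysum linear → Pre_bysum linear → Spec_bysum linear (bysum linear)

-- ===== LEMMAS AND PROOFS =====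

-- A's loop, re-expressed element-wise: state + previous element
def afold (g : List (List (List Int))) (prev : List Int) :
    List (List Int) → List (List (List Int))
  | [] => g
  | y :: ys =>
    if y.sum = prev.sum then afold (g.dropLast ++ [g.getLastD [] ++ [y]]) y ys
    else afold (g ++ [[y]]) y ys

-- structural grouping: one group per maximal run of equal sums
def grec : List (List Int) → List (List (List Int))
  | [] => []
  | x :: xs =>
    (x :: xs.takeWhile (fun z => z.sum == x.sum)) ::
      grec (xs.dropWhile (fun z => z.sum == x.sum))
termination_by l => l.length
decreasing_by
  have := List.length_dropWhile_le (fun z => z.sum == x.sum) xs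
  simp; omega

theorem runlen_eq_aux : ∀ (fuel : Nat) (linear : List (List Int)) (s : Int) (k : Nat),
    linear.length ≤ k + fuel →
    runlen linear (linear.length : Int) s (k : Int)
      = (k : Int) + (((linear.drop k).takeWhile (fun z => z.sum == s)).length : Int) := by
  intro fuel
  induction fuel with
  | zero =>
    intro linear s k hk
    simp only [Nat.add_zero] at hk
    rw [runlen]
    rw [List.drop_eq_nil_of_le hk]
    have : ¬ ((k : Int) < (linear.length : Int) ∧ (PySem.List.pyGetD linear (k : Int) []).sum = s) := by
      push_neg; intro h; omega
    rw [dif_neg this]; simp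
  | succ fuel ih =>
    intro linear s k hk
    by_cases hlt : k < linear.length
    · rw [runlen]
      have hget : PySem.List.pyGetD linear (k : Int) [] = linear[k] := by
        rw [PySem.List.pyGetD_natCast, List.getD_eq_getElem?_getD, List.getElem?_eq_getElem hlt]
        rfl
      rw [List.drop_eq_getElem_cons hlt]
      by_cases hs : (linear[k]'hlt).sum = s
      · have hcond : ((k : Int) < (linear.length : Int) ∧ (PySem.List.pyGetD linear (k : Int) []).sum = s) := by
          constructor
          · exact_mod_cast hlt
          · rw [hget]; exact hs
        rw [dif_pos hcond]
        have : ((k : Int) + 1) = ((k + 1 : Nat) : Int) := by push_cast; ring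
        rw [this, ih linear s (k+1) (by omega)]
        rw [List.takeWhile_cons_of_pos (by simp [hs])]
        simp; push_cast; ring
      · have hcond : ¬ ((k : Int) < (linear.length : Int) ∧ (PySem.List.pyGetD linear (k : Int) []).sum = s) := by
          rw [hget]; push_neg; intro _; exact hs
        rw [dif_neg hcond]
        rw [List.takeWhile_cons_of_neg (by simp [hs])]
        simp
    · rw [runlen]
      rw [List.drop_eq_nil_of_le (by omega)]
      have : ¬ ((k : Int) < (linear.length : Int) ∧ (PySem.List.pyGetD linear (k : Int) []).sum = s) := by
        push_neg; intro h; omega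
      rw [dif_neg this]
      simp

theorem bloop_eq_aux : ∀ (fuel : Nat) (linear : List (List Int)) (i : Nat) (out : List (List (List Int))),
    linear.length ≤ i + fuel →
    bloop linear (linear.length : Int) (i : Int) out = out ++ grec (linear.drop i) := by
  intro fuel
  induction fuel with
  | zero =>
    intro linear i out hk
    simp only [Nat.add_zero] at hk
    rw [bloop, dif_neg (by exact_mod_cast not_lt.mpr hk), List.drop_eq_nil_of_le hk, grec]
    simp
  | succ fuel ih =>
    intro linear i out hk
    by_cases hlt : i < linear.length
    · rw [bloop, dif_pos (show (i : Int) < (linear.length : Int) by exact_mod_cast hlt)]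
      have hget : PySem.List.pyGetD linear (i : Int) [] = linear[i] := by
        rw [PySem.List.pyGetD_natCast, List.getD_eq_getElem?_getD, List.getElem?_eq_getElem hlt]
        rfl
      rw [hget]
      have hcast : ((i : Int) + 1) = ((i + 1 : Nat) : Int) := by push_cast; ring
      dsimp only
      rw [hcast, runlen_eq_aux fuel linear ((linear[i]'hlt).sum) (i + 1) (by omega)]
      set p : List Int → Bool := fun z => z.sum == (linear[i]'hlt).sum with hp
      set m : Nat := ((linear.drop (i + 1)).takeWhile p).length with hm
      have hj : ((i + 1 : Nat) : Int) + (m : Int) = ((i + 1 + m : Nat) : Int) := by push_cast; ring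
      rw [hj, ih linear (i + 1 + m) _ (by omega)]
      have hslice : PySem.List.slice linear (some ((i : Nat) : Int)) (some ((i + 1 + m : Nat) : Int))
          = linear[i] :: (linear.drop (i + 1)).takeWhile p := by
        rw [PySem.List.slice_toNat linear (by positivity) (by positivity)]
        simp only [Int.toNat_natCast]
        have : i + 1 + m - i = m + 1 := by omega
        rw [this, List.drop_eq_getElem_cons hlt]
        rw [List.take_succ_cons]
        congr 1
        rw [hm]
        exact ((List.prefix_iff_eq_take.mp (List.takeWhile_prefix p)).symm)
      have hdd : (linear.drop (i + 1)).drop m = linear.drop (i + 1 + m) := by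
        rw [List.drop_drop]
      have hdrop : linear.drop (i + 1 + m) = (linear.drop (i + 1)).dropWhile p := by
        rw [← hdd]
        conv_lhs => rw [show linear.drop (i+1) = (linear.drop (i+1)).takeWhile p ++ (linear.drop (i+1)).dropWhile p from (List.takeWhile_append_dropWhile).symm]
        rw [hm, List.drop_left]
      rw [hslice, hdrop]
      conv_rhs => rw [List.drop_eq_getElem_cons hlt, grec]
      simp [hp]
    · simp only [Nat.add_succ] at hk
      rw [bloop, dif_neg (by exact_mod_cast not_lt.mpr (by omega : linear.length ≤ i)),
        List.drop_eq_nil_of_le (by omega), grec]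
      simp

theorem afold_conv (xs : List (List Int)) : ∀ (fuel : Nat) (k : Nat) (g : List (List (List Int))),
    xs.length ≤ (k + 1) + fuel →
    (PySem.List.pyRange ((k : Int) + 1) (xs.length : Int) 1).foldl
      (fun g i =>
        if (PySem.List.pyGetD xs i []).sum = (PySem.List.pyGetD xs (i - 1) []).sum then
          g.dropLast ++ [g.getLastD [] ++ [PySem.List.pyGetD xs i []]]
        else
          g ++ [[PySem.List.pyGetD xs i []]]) g
      = afold g (PySem.List.pyGetD xs (k : Int) []) (xs.drop (k + 1)) := by
  intro fuel
  induction fuel with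
  | zero =>
    intro k g hk
    rw [PySem.List.pyRange_one_eq_nil (by exact_mod_cast hk), List.foldl_nil,
      List.drop_eq_nil_of_le (by omega)]
    rfl
  | succ fuel ih =>
    intro k g hk
    by_cases h : k + 1 < xs.length
    · have hcast : ((k : Int) + 1) < (xs.length : Int) := by exact_mod_cast h
      rw [PySem.List.pyRange_one_cons hcast, List.foldl_cons]
      have e2 : ((k : Int) + 1) - 1 = (k : Int) := by ring
      rw [e2]
      have e1 : ((k : Int) + 1) = ((k + 1 : Nat) : Int) := by push_cast; ring
      rw [e1, ih (k + 1) _ (by omega)]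
      have hget : PySem.List.pyGetD xs ((k + 1 : Nat) : Int) [] = xs[k + 1] := by
        rw [PySem.List.pyGetD_natCast, List.getD_eq_getElem?_getD, List.getElem?_eq_getElem h]
        rfl
      rw [hget]
      conv_rhs => rw [List.drop_eq_getElem_cons h]
      rw [afold]
      split_ifs <;> rfl
    · rw [PySem.List.pyRange_one_eq_nil (by exact_mod_cast not_lt.mp h), List.foldl_nil,
        List.drop_eq_nil_of_le (by omega)]
      rfl

theorem afold_key : ∀ (ys : List (List Int)) (G : List (List (List Int))) (g : List (List Int)) (x : List Int),
    afold (G ++ [g ++ [x]]) x ys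
      = G ++ ((g ++ [x]) ++ ys.takeWhile (fun z => z.sum == x.sum))
          :: grec (ys.dropWhile (fun z => z.sum == x.sum)) := by
  intro ys
  induction ys with
  | nil => intro G g x; simp [afold, grec]
  | cons y ys ih =>
    intro G g x
    rw [afold]
    by_cases hs : y.sum = x.sum
    · rw [if_pos hs]
      have hl1 : (G ++ [g ++ [x]]).dropLast = G := by simp
      have hl2 : (G ++ [g ++ [x]]).getLastD [] = g ++ [x] := by
        rw [List.getLastD_concat]
      rw [hl1, hl2, show (g ++ [x]) ++ [y] = (g ++ [x]) ++ [y] from rfl]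
      rw [ih G (g ++ [x]) y]
      have hpeq : (fun z : List Int => z.sum == y.sum) = (fun z : List Int => z.sum == x.sum) := by
        funext z; rw [hs]
      rw [hpeq, List.takeWhile_cons_of_pos (by simp [hs]), List.dropWhile_cons_of_pos (by simp [hs])]
      simp
    · rw [if_neg hs]
      have : G ++ [g ++ [x]] ++ [[y]] = (G ++ [g ++ [x]]) ++ [[] ++ [y]] := by simp
      rw [this, ih (G ++ [g ++ [x]]) [] y]
      rw [List.takeWhile_cons_of_neg (by simp [hs]), List.dropWhile_cons_of_neg (by simp [hs])]
      rw [grec]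
      simp

theorem alt_eq_grec (linear : List (List Int)) : bysum_alt linear = grec linear := by
  rw [bysum_alt]
  have h := bloop_eq_aux linear.length linear 0 [] (by omega)
  simpa using h

-- ===== VERDICT (by name: the statement is the Claim_ definition above) =====
theorem bysum_spec : Claim_equal_bysum := by
  intro linear _ hpre
  show bysum linear = bysum_alt linear
  obtain ⟨x, xs, rfl⟩ := List.exists_cons_of_ne_nil hpre
  rw [bysum]
  have hc := afold_conv (x :: xs) (x :: xs).length 0 [[x]] (by simp)
  have hg0 : PySem.List.pyGetD (x :: xs) ((0 : Nat) : Int) [] = x := by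
    rw [PySem.List.pyGetD_natCast]; rfl
  rw [hg0] at hc
  simp only [Nat.cast_zero, zero_add] at hc
  have hget0 : PySem.List.pyGet? (x :: xs) 0 = some x := by
    simp [PySem.List.pyGet?, PySem.List.pyIdx?]
  rw [hget0]
  dsimp only
  simp only [List.drop_succ_cons, List.drop_zero] at hc
  rw [hc]
  have hkey := afold_key xs [] [] x
  simp only [List.nil_append] at hkey
  rw [hkey, alt_eq_grec, grec]
  simp
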